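-- pv_equiv track=rewrite | github.com/audunrug/Advent_of_code_2022 | day_6.py | split_by_marker
-- ===== SOURCE A (Python) =====
-- def split_by_marker(input_str, l):
--     segments = []
--     last = 0
--     for i in range(len(input_str)-l):
--         chars = set(input_str[i:i+l])
--         if len(chars) == l:
--             segments.append(input_str[last:i+l])
--             last = i
--     return segments
-- ===== SOURCE B (Python) =====
-- def split_by_marker(input_str, l):
--     # Sliding window: a char-count dict and a running distinct count replace
--     # the per-position set() construction (O(n) instead of O(n*l)).
--     if l < 0:
--         return []  # no window has a negative number of distinct chars
--     counts = {}
--     distinct = 0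
--     for c in input_str[:l]:
--         counts[c] = counts.get(c, 0) + 1
--         if counts[c] == 1:
--             distinct += 1
--     segments = []
--     last = 0
--     for i, (c_out, c_in) in enumerate(zip(input_str, input_str[l:])):
--         if distinct == l:
--             segments.append(input_str[last:i + l])
--             last = i
--         counts[c_out] = counts.get(c_out, 0) - 1
--         if counts[c_out] == 0:
--             distinct -= 1
--         counts[c_in] = counts.get(c_in, 0) + 1
--         if counts[c_in] == 1:
--             distinct += 1
--     return segments
-- ===== Notes on version B (the rewrite author's own statement) =====
-- stated objective: faster
-- what changed: Replaces building a fresh set() of every length-l slice with a single sliding window that maintains a char-count dict and a running distinct count, updated in O(1) per position.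
import Mathlib
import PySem

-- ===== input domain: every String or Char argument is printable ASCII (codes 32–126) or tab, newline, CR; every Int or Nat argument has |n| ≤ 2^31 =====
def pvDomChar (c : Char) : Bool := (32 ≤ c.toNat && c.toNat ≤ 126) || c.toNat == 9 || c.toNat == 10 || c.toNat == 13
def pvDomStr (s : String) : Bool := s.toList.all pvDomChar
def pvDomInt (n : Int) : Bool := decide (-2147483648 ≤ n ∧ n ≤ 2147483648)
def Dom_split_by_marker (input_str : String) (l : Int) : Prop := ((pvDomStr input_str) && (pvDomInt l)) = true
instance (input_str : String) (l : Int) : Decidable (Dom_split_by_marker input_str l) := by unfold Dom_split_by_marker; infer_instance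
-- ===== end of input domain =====

-- B replaces the per-position set() of each length-l window by an O(n) sliding window
-- (char-count dict + running distinct count); return value only, no argument is mutated.

-- ===== PORT A =====
-- loop body of A: state (segments, last), loop variable i
def aStep (input_str : String) (l : Int) (st : List String × Int) (i : Int) : List String × Int :=
  let chars := PySem.Set.ofList (PySem.Str.slice input_str (some i) (some (i + l))).toList
  if PySem.Set.len chars = l then
    (st.1 ++ [PySem.Str.slice input_str (some st.2) (some (i + l))], i)
  else st

def split_by_marker (input_str : String) (l : Int) : List String :=
  ((PySem.List.pyRange 0 (PySem.Str.len input_str - l) 1).foldl (aStep input_str l) ([], 0)).1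

-- ===== PORT B =====
-- first loop of B: build counts/distinct for the initial window input_str[:l]
def bInitStep (st : PySem.Dict Char Int × Int) (c : Char) : PySem.Dict Char Int × Int :=
  let d := st.1.modify c 0 (· + 1)
  (d, if d.getD c 0 = 1 then st.2 + 1 else st.2)

-- main loop of B: state (segments, last, counts, distinct), element (i, (c_out, c_in))
def bStep (input_str : String) (l : Int) (st : List String × Int × PySem.Dict Char Int × Int)
    (p : Int × Char × Char) : List String × Int × PySem.Dict Char Int × Int :=
  let seg := st.1; let last := st.2.1; let d := st.2.2.1; let dist := st.2.2.2
  let (seg', last') :=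
    if dist = l then (seg ++ [PySem.Str.slice input_str (some last) (some (p.1 + l))], p.1)
    else (seg, last)
  let d1 := d.modify p.2.1 0 (· - 1)
  let dist1 := if d1.getD p.2.1 0 = 0 then dist - 1 else dist
  let d2 := d1.modify p.2.2 0 (· + 1)
  let dist2 := if d2.getD p.2.2 0 = 1 then dist1 + 1 else dist1
  (seg', last', d2, dist2)

def split_by_marker_alt (input_str : String) (l : Int) : List String :=
  if l < 0 then []   -- no window has a negative number of distinct chars
  else
    let init := (PySem.Str.slice input_str none (some l)).toList.foldl bInitStep (PySem.Dict.empty, 0)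
    ((PySem.List.enumerate
        (List.zip input_str.toList (PySem.Str.slice input_str (some l) none).toList) 0).foldl
      (bStep input_str l) ([], 0, init.1, init.2)).1

-- ===== PRECONDITION & SPEC =====
def Spec_split_by_marker (input_str : String) (l : Int) (out : List String) : Prop := out = split_by_marker_alt input_str l
instance (input_str : String) (l : Int) (out : List String) : Decidable (Spec_split_by_marker input_str l out) := by unfold Spec_split_by_marker; infer_instance

-- ===== CLAIM (what is proved, stated in full; the proofs are below) =====
def Claim_equal_split_by_marker : Prop := ∀ (input_str : String) (l : Int), Dom_split_by_marker input_str l → Spec_split_by_marker input_str l (split_by_marker input_str l)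

-- ===== LEMMAS AND PROOFS =====

-- set(w) has as many elements as w has distinct characters
lemma setlen_eq_card (xs : List Char) :
    PySem.Set.len (PySem.Set.ofList xs) = (xs.toFinset.card : Int) := by
  have hfin : (PySem.Set.ofList xs).toFinset = xs.toFinset := by
    ext c; simp [List.mem_toFinset, PySem.Set.mem_ofList]
  simp [PySem.Set.len, ← List.toFinset_card_of_nodup (PySem.Set.nodup_ofList xs), hfin]

lemma card_cons (c : Char) (ys : List Char) :
    ((c :: ys).toFinset.card : Int) = (ys.toFinset.card : Int) + (if c ∈ ys then 0 else 1) := by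
  by_cases h : c ∈ ys
  · simp [List.toFinset_cons, Finset.insert_eq_self.2 (List.mem_toFinset.2 h), h]
  · rw [List.toFinset_cons, Finset.card_insert_of_notMem (by simp [h])]
    simp [h]

lemma card_append_singleton (ys : List Char) (c : Char) :
    ((ys ++ [c]).toFinset.card : Int) = (ys.toFinset.card : Int) + (if c ∈ ys then 0 else 1) := by
  have h1 : (ys ++ [c]).toFinset = insert c ys.toFinset := by
    rw [List.toFinset_append]; simp
  by_cases h : c ∈ ys
  · simp [h1, Finset.insert_eq_self.2 (List.mem_toFinset.2 h), h]
  · rw [h1, Finset.card_insert_of_notMem (by simp [h])]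
    simp [h]

-- the initial loop establishes the counts/distinct invariant for the first window
lemma init_inv (zs : List Char) : ∀ (ys : List Char) (d : PySem.Dict Char Int) (dist : Int),
    (∀ c, d.getD c 0 = (ys.count c : Int)) →
    dist = (ys.toFinset.card : Int) →
    (∀ c, (zs.foldl bInitStep (d, dist)).1.getD c 0 = ((ys ++ zs).count c : Int)) ∧
      (zs.foldl bInitStep (d, dist)).2 = ((ys ++ zs).toFinset.card : Int) := by
  induction zs with
  | nil => intro ys d dist hd hdist; simpa using ⟨hd, hdist⟩
  | cons z zs ih =>
    intro ys d dist hd hdist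
    have hd' : ∀ c, (d.modify z 0 (· + 1)).getD c 0 = ((ys ++ [z]).count c : Int) := by
      intro c
      rw [PySem.Dict.getD_modify]
      by_cases hc : c = z
      · subst hc; rw [if_pos rfl, hd c]; simp [List.count_append]
      · rw [if_neg hc, hd c]; simp [List.count_append, Ne.symm hc]
    have hcond : ((d.modify z 0 (· + 1)).getD z 0 = 1) ↔ z ∉ ys := by
      rw [hd' z]
      simp [List.count_append]
      constructor
      · intro h; exact List.count_eq_zero.mp (by exact_mod_cast h)
      · intro h; exact_mod_cast congrArg (Nat.cast : Nat → Int) (List.count_eq_zero.mpr h)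
    have hdist' : (if (d.modify z 0 (· + 1)).getD z 0 = 1 then dist + 1 else dist)
        = ((ys ++ [z]).toFinset.card : Int) := by
      rw [card_append_singleton, hdist]
      by_cases hz : z ∈ ys
      · rw [if_neg (by rw [hcond]; simp [hz]), if_pos hz]; ring
      · rw [if_pos (hcond.mpr hz), if_neg hz]
    have := ih (ys ++ [z]) (d.modify z 0 (· + 1))
      (if (d.modify z 0 (· + 1)).getD z 0 = 1 then dist + 1 else dist) hd' hdist'
    simpa [bInitStep, List.append_assoc] using this

-- one slide of the window keeps the invariant (non-degenerate window c_out :: rest)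
lemma slide_inv (rest : List Char) (cout cin : Char) (d : PySem.Dict Char Int) (dist : Int)
    (hd : ∀ c, d.getD c 0 = ((cout :: rest).count c : Int))
    (hdist : dist = ((cout :: rest).toFinset.card : Int)) :
    (∀ c, ((d.modify cout 0 (· - 1)).modify cin 0 (· + 1)).getD c 0 = ((rest ++ [cin]).count c : Int)) ∧
      ((if ((d.modify cout 0 (· - 1)).modify cin 0 (· + 1)).getD cin 0 = 1 then
          (if (d.modify cout 0 (· - 1)).getD cout 0 = 0 then dist - 1 else dist) + 1
        else (if (d.modify cout 0 (· - 1)).getD cout 0 = 0 then dist - 1 else dist))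
        = ((rest ++ [cin]).toFinset.card : Int)) := by
  have hd1 : ∀ c, (d.modify cout 0 (· - 1)).getD c 0 = (rest.count c : Int) := by
    intro c
    rw [PySem.Dict.getD_modify]
    by_cases hc : c = cout
    · subst hc; rw [if_pos rfl, hd c]; simp
    · rw [if_neg hc, hd c]; simp [Ne.symm hc]
  have hd2 : ∀ c, ((d.modify cout 0 (· - 1)).modify cin 0 (· + 1)).getD c 0
      = ((rest ++ [cin]).count c : Int) := by
    intro c
    rw [PySem.Dict.getD_modify]
    by_cases hc : c = cin
    · subst hc; rw [if_pos rfl, hd1 c]; simp [List.count_append]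
    · rw [if_neg hc, hd1 c]; simp [List.count_append, Ne.symm hc]
  refine ⟨hd2, ?_⟩
  have hcout : ((d.modify cout 0 (· - 1)).getD cout 0 = 0) ↔ cout ∉ rest := by
    rw [hd1 cout]
    constructor
    · intro h; exact List.count_eq_zero.mp (by exact_mod_cast h)
    · intro h; exact_mod_cast congrArg (Nat.cast : Nat → Int) (List.count_eq_zero.mpr h)
  have hcin : (((d.modify cout 0 (· - 1)).modify cin 0 (· + 1)).getD cin 0 = 1) ↔ cin ∉ rest := by
    rw [hd2 cin]
    simp [List.count_append]
    constructor
    · intro h; exact List.count_eq_zero.mp (by exact_mod_cast h)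
    · intro h; exact_mod_cast congrArg (Nat.cast : Nat → Int) (List.count_eq_zero.mpr h)
  rw [card_append_singleton, hdist, card_cons]
  by_cases h1 : cout ∈ rest <;> by_cases h2 : cin ∈ rest <;>
    simp only [hcout, hcin] <;> simp [h1, h2]

-- the two loops produce the same segments list, given the invariant at position j
lemma loop_eq (s : String) (l' : Nat) (k : Nat) : ∀ (j : Nat) (seg : List String) (last : Int)
    (d : PySem.Dict Char Int) (dist : Int),
    s.toList.length - j ≤ k →
    (∀ c, d.getD c 0 = ((((s.toList.drop j).take l').count c : Nat) : Int)) →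
    dist = (((s.toList.drop j).take l').toFinset.card : Int) →
    ((PySem.List.pyRange (j : Int) ((s.toList.length : Int) - (l' : Int)) 1).foldl
        (aStep s (l' : Int)) (seg, last)).1
      = ((PySem.List.enumerate (List.zip (s.toList.drop j) (s.toList.drop (l' + j))) (j : Int)).foldl
          (bStep s (l' : Int)) (seg, last, d, dist)).1 := by
  induction k with
  | zero =>
    intro j seg last d dist hk hd hdist
    rw [PySem.List.pyRange_one_eq_nil (by omega),
        List.drop_eq_nil_of_le (by omega : s.toList.length ≤ j), List.zip_nil_left]
    rfl
  | succ k ih =>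
    intro j seg last d dist hk hd hdist
    by_cases hj : (j : Int) < (s.toList.length : Int) - (l' : Int)
    · have hln : l' + j < s.toList.length := by push_cast at hj; omega
      have hjn : j < s.toList.length := by omega
      rw [PySem.List.pyRange_one_cons hj, List.drop_eq_getElem_cons hjn,
          List.drop_eq_getElem_cons hln, List.zip_cons_cons, PySem.List.enumerate_cons]
      simp only [List.foldl_cons]
      -- the set-size test of A is the running distinct count of B
      have hw : (PySem.Str.slice s (some (j : Int)) (some ((j : Int) + (l' : Int)))).toList
          = (s.toList.drop j).take l' := by
        rw [PySem.Str.toList_slice, PySem.Chars.slice_eq_listSlice, PySem.List.slice_natCast_add]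
      have hcondA : (PySem.Set.len (PySem.Set.ofList
            (PySem.Str.slice s (some (j : Int)) (some ((j : Int) + (l' : Int)))).toList) = (l' : Int))
          ↔ dist = (l' : Int) := by
        rw [hw, setlen_eq_card, hdist]
      -- the counts/distinct invariant is preserved by one slide of the window
      have hstep : (∀ c, ((d.modify s.toList[j] 0 (· - 1)).modify s.toList[l' + j] 0 (· + 1)).getD c 0
            = (((s.toList.drop (j + 1)).take l').count c : Int)) ∧
          ((if ((d.modify s.toList[j] 0 (· - 1)).modify s.toList[l' + j] 0 (· + 1)).getD s.toList[l' + j] 0 = 1 then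
              (if (d.modify s.toList[j] 0 (· - 1)).getD s.toList[j] 0 = 0 then dist - 1 else dist) + 1
            else (if (d.modify s.toList[j] 0 (· - 1)).getD s.toList[j] 0 = 0 then dist - 1 else dist))
            = (((s.toList.drop (j + 1)).take l').toFinset.card : Int)) := by
        cases l' with
        | zero =>
          have hzero : ∀ c, d.getD c 0 = 0 := by intro c; rw [hd c]; simp
          have hjj : s.toList[0 + j] = s.toList[j] := by simp only [Nat.zero_add]
          refine ⟨?_, ?_⟩
          · intro c
            rw [hjj]
            by_cases hc : c = s.toList[j] <;>
              simp [PySem.Dict.getD_modify, hc, hzero]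
          · rw [hjj]
            simp [hzero, hdist]
        | succ m =>
          have hsplit1 : (s.toList.drop j).take (m + 1)
              = s.toList[j] :: (s.toList.drop (j + 1)).take m := by
            rw [List.drop_eq_getElem_cons hjn, List.take_succ_cons]
          have hm : m < (s.toList.drop (j + 1)).length := by
            rw [List.length_drop]; omega
          have hsplit2 : (s.toList.drop (j + 1)).take (m + 1)
              = (s.toList.drop (j + 1)).take m ++ [s.toList[m + 1 + j]] := by
            rw [List.take_succ, List.getElem?_eq_getElem hm]
            simp only [List.getElem_drop, Option.toList_some]
            have hidx : s.toList[j + 1 + m] = s.toList[m + 1 + j] := by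
              have h1 : s.toList[j + 1 + m]? = s.toList[m + 1 + j]? := by
                rw [show j + 1 + m = m + 1 + j from by omega]
              rw [List.getElem?_eq_getElem (by omega), List.getElem?_eq_getElem (by omega)] at h1
              exact Option.some.inj h1
            rw [hidx]
          have hd1 : ∀ c, d.getD c 0
              = ((s.toList[j] :: (s.toList.drop (j + 1)).take m).count c : Int) := by
            intro c; rw [hd c, hsplit1]
          have hdist1 : dist = (((s.toList[j] :: (s.toList.drop (j + 1)).take m)).toFinset.card : Int) := by
            rw [hdist, hsplit1]
          have := slide_inv ((s.toList.drop (j + 1)).take m) s.toList[j] s.toList[m + 1 + j] d dist hd1 hdist1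
          rw [hsplit2]
          exact this
      -- one step of each loop, then the induction hypothesis at j + 1
      simp only [aStep, bStep, hcondA]
      have harr : (l' : Nat) + j + 1 = l' + (j + 1) := by omega
      have hcast : ((j : Int)) + 1 = ((j + 1 : Nat) : Int) := by push_cast; ring
      by_cases hC : dist = (l' : Int)
      · rw [if_pos hC, hcast, harr]
        exact ih (j + 1) _ _ _ _ (by omega) hstep.1 hstep.2
      · rw [if_neg hC, hcast, harr]
        exact ih (j + 1) _ _ _ _ (by omega) hstep.1 hstep.2
    · rw [PySem.List.pyRange_one_eq_nil (by omega),
          List.drop_eq_nil_of_le (by omega : s.toList.length ≤ l' + j),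
          List.zip_nil_right]
      rfl

-- ===== VERDICT (by name: the statement is the Claim_ definition above) =====
theorem split_by_marker_spec : Claim_equal_split_by_marker := by
  intro s l _
  unfold Spec_split_by_marker
  by_cases hl : l < 0
  · -- negative l: A's distinct-count test can never equal l, B returns [] at once
    have hA : ((PySem.List.pyRange 0 (PySem.Str.len s - l) 1).foldl (aStep s l) ([], 0))
        = (([], 0) : List String × Int) := by
      rw [PySem.List.foldl_congr_mem _ (aStep s l) (fun st _ => st) ([], 0) (by
        intro acc x hx
        unfold aStep
        rw [if_neg]
        rw [setlen_eq_card]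
        have : (0 : Int) ≤ ((PySem.Str.slice s (some x) (some (x + l))).toList.toFinset.card : Int) :=
          Int.natCast_nonneg _
        omega), PySem.List.foldl_ignore]
    simp only [split_by_marker, split_by_marker_alt, hA, if_pos hl]
  · rw [not_lt] at hl
    have hl' : ((l.toNat : Nat) : Int) = l := Int.toNat_of_nonneg hl
    have hsl : (PySem.Str.slice s none (some l)).toList = s.toList.take l.toNat := by
      rw [PySem.Str.toList_slice, PySem.Chars.slice_eq_listSlice, PySem.List.slice_to _ hl]
    have hsf : (PySem.Str.slice s (some l) none).toList = s.toList.drop l.toNat := by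
      rw [PySem.Str.toList_slice, PySem.Chars.slice_eq_listSlice, PySem.List.slice_from _ hl]
    obtain ⟨hd0, hdist0⟩ := init_inv (s.toList.take l.toNat) [] PySem.Dict.empty 0
      (fun c => by simp [PySem.Dict.getD_empty]) (by simp)
    have main := loop_eq s l.toNat s.toList.length 0 []
      0
      ((s.toList.take l.toNat).foldl bInitStep (PySem.Dict.empty, 0)).1
      ((s.toList.take l.toNat).foldl bInitStep (PySem.Dict.empty, 0)).2
      (by omega)
      (fun c => by rw [hd0 c]; simp)
      (by rw [hdist0]; simp)
    simp only [Nat.cast_zero, List.drop_zero, Nat.add_zero] at main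
    simp only [split_by_marker, split_by_marker_alt, if_neg (show ¬ l < 0 by omega),
      PySem.Str.len_eq, hsl, hsf]
    rw [← hl']
    exact main
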